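-- pv_equiv track=rewrite | github.com/lenoirgn/MyBegginerWorkPython | correction_td.py | prefixe_somme
-- ===== SOURCE A (Python) =====
-- def prefixe_somme(lentier:list[int],entier:int)->list[int]:
--     """ à_remplacer_par_ce_que_fait_la_fonction
--
--     Précondition :
--     Exemple(s) :
--     $$$ prefixe_somme([1, 2, 3], 1)
--     [1]
--     $$$ prefixe_somme([1, 2, 3], 4)
--     [1, 2, 3]
--     $$$ prefixe_somme([1, 2, 3], 10)
--     [1, 2, 3]
--     """
--     somme=0
--     i=0
--     lres=[]
--     while i<len(lentier) and somme<entier: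
--         lres.append(lentier[i])
--         somme+=lentier[i]
--         i+=1
--     return lres
-- ===== SOURCE B (Python) =====
-- def prefixe_somme(lentier: list[int], entier: int) -> list[int]:
--     # Prefix-sum table + cutoff scan instead of the incremental append loop.
--     if entier <= 0:
--         return []
--     sums = []
--     total = 0
--     for x in lentier:
--         total += x
--         sums.append(total)
--     for i, s in enumerate(sums):
--         if s >= entier:
--             return lentier[:i + 1]
--     return lentier[:]
-- ===== Notes on version B (the rewrite author's own statement) =====
-- stated objective: alternative
-- what changed: Replaces the incremental while-loop with a stopping condition woven into the accumulation by a two-phase decomposition: build the full prefix-sum table, then scan it for the first cumulative sum reaching the threshold and slice the list there (guarding entier <= 0 up front, where the empty prefix already suffices).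
import Mathlib
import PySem

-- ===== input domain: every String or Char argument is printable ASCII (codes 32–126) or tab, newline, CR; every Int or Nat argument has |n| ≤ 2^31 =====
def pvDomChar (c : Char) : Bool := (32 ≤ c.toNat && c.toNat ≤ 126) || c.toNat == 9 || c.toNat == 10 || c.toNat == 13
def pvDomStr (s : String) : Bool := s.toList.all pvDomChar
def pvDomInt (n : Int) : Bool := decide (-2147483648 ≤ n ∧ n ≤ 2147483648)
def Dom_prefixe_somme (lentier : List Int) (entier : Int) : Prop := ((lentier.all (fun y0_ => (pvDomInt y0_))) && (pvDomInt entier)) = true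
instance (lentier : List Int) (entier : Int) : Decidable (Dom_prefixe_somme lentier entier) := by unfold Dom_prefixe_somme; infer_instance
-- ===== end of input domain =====

-- B replaces A's incremental append loop by a prefix-sum table plus a cutoff/slice (alternative decomposition, same cost).


-- ===== PORT A =====
-- while i < len(lentier) and somme < entier: append lentier[i]; somme += lentier[i]; i += 1
-- (the index i walks the list front to back, so the loop is recursion on the remaining list with accumulator somme)
def pvAloop (entier : Int) : List Int → Int → List Int
  | [], _ => []
  | x :: xs, somme => if somme < entier then x :: pvAloop entier xs (somme + x) else []

def prefixe_somme (lentier : List Int) (entier : Int) : List Int :=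
  pvAloop entier lentier 0

-- ===== PORT B =====
-- prefix sums (the first for-loop of Source B)
def pvSums (total : Int) : List Int → List Int
  | [] => []
  | x :: xs => (total + x) :: pvSums (total + x) xs

-- enumerate scan: first index i with sums[i] >= entier (the second for-loop of Source B)
def pvFindGe (entier : Int) : List Int → Nat → Option Nat
  | [], _ => none
  | s :: rest, i => if entier ≤ s then some i else pvFindGe entier rest (i + 1)

def prefixe_somme_alt (lentier : List Int) (entier : Int) : List Int :=
  if entier ≤ 0 then []
  else
    match pvFindGe entier (pvSums 0 lentier) 0 with
    | some i => lentier.take (i + 1)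
    | none => lentier

-- ===== PRECONDITION & SPEC =====
def Spec_prefixe_somme (lentier : List Int) (entier : Int) (out : List Int) : Prop := out = prefixe_somme_alt lentier entier
instance (lentier : List Int) (entier : Int) (out : List Int) : Decidable (Spec_prefixe_somme lentier entier out) := by unfold Spec_prefixe_somme; infer_instance

-- ===== CLAIM (what is proved, stated in full; the proofs are below) =====
def Claim_equal_prefixe_somme : Prop := ∀ (lentier : List Int) (entier : Int), Dom_prefixe_somme lentier entier → Spec_prefixe_somme lentier entier (prefixe_somme lentier entier)

-- ===== LEMMAS AND PROOFS =====

theorem pvAloop_stop (entier somme : Int) (xs : List Int) (h : entier ≤ somme) :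
    pvAloop entier xs somme = [] := by
  cases xs with
  | nil => rfl
  | cons x xs => simp [pvAloop, not_lt.mpr h]

theorem pvFindGe_shift (entier : Int) (l : List Int) (i : Nat) :
    pvFindGe entier l i = (pvFindGe entier l 0).map (· + i) := by
  induction l generalizing i with
  | nil => rfl
  | cons s rest ih =>
    by_cases h : entier ≤ s
    · simp [pvFindGe, h]
    · simp only [pvFindGe, if_neg h]
      rw [ih (i + 1), ih 1, Option.map_map]
      congr 1
      funext j
      simp
      omega

theorem pvAloop_eq (entier : Int) (xs : List Int) :
    ∀ somme : Int, somme < entier →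
      pvAloop entier xs somme =
        (match pvFindGe entier (pvSums somme xs) 0 with
         | some i => xs.take (i + 1)
         | none => xs) := by
  induction xs with
  | nil => intro somme _; rfl
  | cons x xs ih =>
    intro somme hs
    simp only [pvAloop, if_pos hs, pvSums]
    by_cases h : entier ≤ somme + x
    · simp [pvFindGe, h, pvAloop_stop entier (somme + x) xs h]
    · simp only [pvFindGe, if_neg h]
      rw [pvFindGe_shift entier (pvSums (somme + x) xs) 1,
          ih (somme + x) (not_le.mp h)]
      cases hf : pvFindGe entier (pvSums (somme + x) xs) 0 with
      | none => simp
      | some i => simp [List.take_succ_cons]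

theorem prefixe_somme_eq_alt (lentier : List Int) (entier : Int) :
    prefixe_somme lentier entier = prefixe_somme_alt lentier entier := by
  unfold prefixe_somme prefixe_somme_alt
  by_cases h : entier ≤ 0
  · simp [if_pos h, pvAloop_stop entier 0 lentier h]
  · rw [if_neg h, pvAloop_eq entier lentier 0 (not_le.mp h)]

-- ===== VERDICT (by name: the statement is the Claim_ definition above) =====
theorem prefixe_somme_spec : Claim_equal_prefixe_somme := by
  intro lentier entier _
  unfold Spec_prefixe_somme
  exact prefixe_somme_eq_alt lentier entier
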